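-- pv_equiv track=rewrite | github.com/mrmoscow/GLT-ADAM-Dash-control | bin/a3attset.py | dec_to_6bit
-- ===== SOURCE A (Python) =====
-- def dec_to_6bit(n, invert=False):
--     if n < 0 or n > 63:
--         raise ValueError("Input must be between 0 and 63 inclusive.")
--     # Convert the decimal number to a 6-bit binary string
--     binary_representation = f"{n:06b}"
--     # Convert the binary string to a list of integers
--     binary_list = [int(bit) for bit in binary_representation]
--     # If invert is True, invert the binary list
--     if invert:
--         binary_list = [1 - bit for bit in binary_list]
--     return binary_list
-- ===== SOURCE B (Python) =====
-- def dec_to_6bit(n, invert=False):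
--     if n < 0 or n > 63:
--         raise ValueError("Input must be between 0 and 63 inclusive.")
--     flag = 1 if invert else 0
--     return [((n >> k) & 1) ^ flag for k in range(5, -1, -1)]
-- ===== Notes on version B (the rewrite author's own statement) =====
-- stated objective: idiomatic
-- what changed: Replaces the binary-string formatting and char-to-int parsing with direct arithmetic bit extraction ((n>>k)&1) and folds the inversion into the same pass via XOR.
import Mathlib
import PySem

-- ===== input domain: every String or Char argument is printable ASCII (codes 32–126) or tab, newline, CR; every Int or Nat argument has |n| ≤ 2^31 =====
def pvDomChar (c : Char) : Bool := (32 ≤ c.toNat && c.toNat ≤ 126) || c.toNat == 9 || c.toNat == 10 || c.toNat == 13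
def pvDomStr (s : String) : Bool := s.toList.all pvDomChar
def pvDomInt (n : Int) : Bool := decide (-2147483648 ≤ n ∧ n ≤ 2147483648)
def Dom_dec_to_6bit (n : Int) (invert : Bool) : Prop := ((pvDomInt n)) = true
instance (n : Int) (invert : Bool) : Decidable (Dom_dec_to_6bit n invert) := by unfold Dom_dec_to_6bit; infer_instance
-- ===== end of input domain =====

-- B replaces A's binary-string formatting + char parsing by direct arithmetic bit extraction
-- with the inversion folded in via XOR (idiomatic; same cost).

-- ===== PORT A =====
-- f"{n:06b}" for 0 ≤ n ≤ 63: binary digits of n (Nat.toDigits 2 gives them MSB-first),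
-- left-padded with '0' to width 6 — exact on the admitted range.
def pvBinStr6 (n : Int) : List Char :=
  let s := Nat.toDigits 2 n.toNat
  List.replicate (6 - s.length) '0' ++ s

def dec_to_6bit (n : Int) (invert : Bool) : List Int :=
  if n < 0 ∨ n > 63 then []  -- Python raises ValueError here; excluded by Pre_
  else
    let binary_representation := pvBinStr6 n
    -- int(bit) on a '0'/'1' character: exact as code point minus 48
    let binary_list := binary_representation.map (fun c => ((c.toNat : Int) - 48))
    if invert then binary_list.map (fun bit => 1 - bit) else binary_list

-- ===== PORT B =====
def dec_to_6bit_alt (n : Int) (invert : Bool) : List Int :=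
  if n < 0 ∨ n > 63 then []  -- Python raises ValueError here; excluded by Pre_
  else
    let flag : Nat := if invert then 1 else 0
    [5, 4, 3, 2, 1, 0].map (fun k => (((((n.toNat >>> k) &&& 1) ^^^ flag) : Nat) : Int))

-- ===== PRECONDITION & SPEC =====
-- Pre_ excludes exactly the inputs where A raises ValueError (n out of 0..63).
def Pre_dec_to_6bit (n : Int) (invert : Bool) : Prop := 0 ≤ n ∧ n ≤ 63
instance (n : Int) (invert : Bool) : Decidable (Pre_dec_to_6bit n invert) := by
  unfold Pre_dec_to_6bit; infer_instance

def pvWitness_dec_to_6bit : Int × Bool := (42, true)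

def Spec_dec_to_6bit (n : Int) (invert : Bool) (out : List Int) : Prop := out = dec_to_6bit_alt n invert
instance (n : Int) (invert : Bool) (out : List Int) : Decidable (Spec_dec_to_6bit n invert out) := by
  unfold Spec_dec_to_6bit; infer_instance

-- ===== CLAIM (what is proved, stated in full; the proofs are below) =====
def Claim_equal_dec_to_6bit : Prop := ∀ (n : Int) (invert : Bool), Dom_dec_to_6bit n invert → Pre_dec_to_6bit n invert → Spec_dec_to_6bit n invert (dec_to_6bit n invert)

-- ===== LEMMAS AND PROOFS =====

-- ===== VERDICT (by name: the statement is the Claim_ definition above) =====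
theorem dec_to_6bit_spec : Claim_equal_dec_to_6bit := by
  intro n invert _ hpre
  obtain ⟨h0, h63⟩ := hpre
  unfold Spec_dec_to_6bit
  interval_cases n <;> cases invert <;> decide
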